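-- pv_equiv track=rewrite | github.com/williamtan37/python-algorithms | radix-sort.py | bucketSortForRadixSort
-- ===== SOURCE A (Python) =====
-- def bucketSortForRadixSort(L, placeValue):
-- 	numberRange = 10 #0-9 aka number of buckets
-- 	buckets = [[] for i in range(numberRange)]
--
-- 	for num in L:
-- 		digitValue = (num // (10 ** placeValue)) % 10
-- 		buckets[digitValue].append(num)
--
-- 	result = []
-- 	for i in range(numberRange):
-- 		for num in buckets[i]:
-- 			result.append(num)
-- 	return result
-- ===== SOURCE B (Python) =====
-- def bucketSortForRadixSort(L, placeValue):
-- 	divisor = 10 ** placeValue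
-- 	return [num for d in range(10) for num in L if (num // divisor) % 10 == d]
-- ===== Notes on version B (the rewrite author's own statement) =====
-- stated objective: simpler
-- what changed: B replaces the mutable list-of-buckets distribution (one pass appending into buckets, then a concatenation pass) by a single comprehension that, for each digit 0-9 in order, filters L for that digit, with the divisor 10**placeValue hoisted out of the loop; no intermediate bucket structure is built.
import Mathlib
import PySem

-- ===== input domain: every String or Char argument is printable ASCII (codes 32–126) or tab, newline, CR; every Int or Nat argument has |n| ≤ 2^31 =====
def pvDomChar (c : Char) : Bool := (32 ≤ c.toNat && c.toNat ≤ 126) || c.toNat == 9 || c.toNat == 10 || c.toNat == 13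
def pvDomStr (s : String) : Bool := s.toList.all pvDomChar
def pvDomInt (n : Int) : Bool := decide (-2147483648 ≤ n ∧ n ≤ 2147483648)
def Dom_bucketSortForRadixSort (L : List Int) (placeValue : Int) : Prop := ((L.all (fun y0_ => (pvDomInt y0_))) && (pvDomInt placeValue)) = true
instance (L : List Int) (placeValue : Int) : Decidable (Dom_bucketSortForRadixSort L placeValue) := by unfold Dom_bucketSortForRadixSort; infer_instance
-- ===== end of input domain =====

-- B replaces A's mutable bucket distribution by one comprehension of ten digit-filter passes (simpler; same cost class).


-- ===== PORT A =====
-- digitValue = (num // (10 ** placeValue)) % 10   (Python floor-division and mod; exponent nonnegative on Pre_)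
def pvDigit (placeValue num : Int) : Int :=
  PySem.Int.mod (PySem.Int.floordiv num (10 ^ placeValue.toNat)) 10

def bucketSortForRadixSort (L : List Int) (placeValue : Int) : List Int :=
  -- buckets = [[] for i in range(10)]
  let buckets0 : List (List Int) := (List.range 10).map (fun _ => ([] : List Int))
  -- for num in L: buckets[digitValue].append(num)
  let buckets := L.foldl (fun bs num =>
      let d := (pvDigit placeValue num).toNat
      bs.set d (bs.getD d [] ++ [num])) buckets0
  -- result = []; for i in range(10): for num in buckets[i]: result.append(num)
  (List.range 10).foldl (fun r i => r ++ buckets.getD i []) []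

-- ===== PORT B =====
-- [num for d in range(10) for num in L if (num // divisor) % 10 == d]
def bucketSortForRadixSort_alt (L : List Int) (placeValue : Int) : List Int :=
  let divisor : Int := 10 ^ placeValue.toNat
  (List.range 10).flatMap (fun (d : Nat) =>
    L.filter (fun num => decide (PySem.Int.mod (PySem.Int.floordiv num divisor) 10 = (d : Int))))

-- ===== PRECONDITION & SPEC =====
-- Pre_ excludes placeValue < 0, on which Python A raises TypeError (10**placeValue is a float, so the bucket index is a float).
def Pre_bucketSortForRadixSort (L : List Int) (placeValue : Int) : Prop := 0 ≤ placeValue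
instance (L : List Int) (placeValue : Int) : Decidable (Pre_bucketSortForRadixSort L placeValue) := by unfold Pre_bucketSortForRadixSort; infer_instance
def pvWitness_bucketSortForRadixSort : List Int × Int := ([170, 45, 75, -90, 802, 24, 2, 66], 1)

def Spec_bucketSortForRadixSort (L : List Int) (placeValue : Int) (out : List Int) : Prop := out = bucketSortForRadixSort_alt L placeValue
instance (L : List Int) (placeValue : Int) (out : List Int) : Decidable (Spec_bucketSortForRadixSort L placeValue out) := by unfold Spec_bucketSortForRadixSort; infer_instance

-- ===== CLAIM (what is proved, stated in full; the proofs are below) =====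
def Claim_equal_bucketSortForRadixSort : Prop := ∀ (L : List Int) (placeValue : Int), Dom_bucketSortForRadixSort L placeValue → Pre_bucketSortForRadixSort L placeValue → Spec_bucketSortForRadixSort L placeValue (bucketSortForRadixSort L placeValue)

-- ===== LEMMAS AND PROOFS =====

theorem pvDigit_nonneg (pv n : Int) : 0 ≤ pvDigit pv n :=
  PySem.Int.mod_nonneg _ (by norm_num)

theorem pvDigit_lt (pv n : Int) : pvDigit pv n < 10 :=
  PySem.Int.mod_lt _ (by norm_num)

-- getD after set, for lists indexed below their length
theorem getD_set (bs : List (List Int)) (i d : Nat) (x : List Int) (hi : i < bs.length) :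
    (bs.set i x).getD d [] = if i = d then x else bs.getD d [] := by
  rcases eq_or_ne i d with h | h
  · subst h; simp [List.getD, List.getElem?_set_self hi]
  · simp [List.getD, List.getElem?_set_ne h, h]

-- invariant of A's distribution loop: bucket d collects, in order, the elements with digit d
theorem bucket_fold (pv : Int) (L : List Int) : ∀ (bs : List (List Int)) (d : Nat),
    bs.length = 10 → d < 10 →
    ((L.foldl (fun bs num =>
        let i := (pvDigit pv num).toNat
        bs.set i (bs.getD i [] ++ [num])) bs).getD d [])
      = bs.getD d [] ++ L.filter (fun n => decide (pvDigit pv n = (d : Int))) := by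
  induction L with
  | nil => intro bs d _ _; simp
  | cons n L ih =>
    intro bs d hlen hd
    have hnn := pvDigit_nonneg pv n
    have hlt := pvDigit_lt pv n
    have hidx : (pvDigit pv n).toNat < bs.length := by omega
    rw [List.foldl_cons]
    rw [ih _ d (by simpa using hlen) hd]
    rw [getD_set bs _ d _ hidx]
    by_cases h : pvDigit pv n = (d : Int)
    · simp [h]
    · have : (pvDigit pv n).toNat ≠ d := by omega
      simp [this, h]

theorem buckets0_getD (d : Nat) :
    (((List.range 10).map (fun _ => ([] : List Int))).getD d []) = [] := by
  rcases Nat.lt_or_ge d 10 with h | h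
  · interval_cases d <;> rfl
  · simp only [List.getD]
    rw [List.getElem?_eq_none (by simpa using h)]
    rfl

-- ===== VERDICT (by name: the statement is the Claim_ definition above) =====
theorem bucketSortForRadixSort_spec : Claim_equal_bucketSortForRadixSort := by
  intro L pv _ _
  unfold Spec_bucketSortForRadixSort bucketSortForRadixSort bucketSortForRadixSort_alt
  rw [PySem.List.foldl_append_eq_flatMap]
  simp only [List.nil_append]
  refine List.flatMap_congr (fun d hd => ?_)
  have hd10 : d < 10 := by simpa using hd
  rw [bucket_fold pv L _ d (by simp) hd10, buckets0_getD d]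
  simp [pvDigit]
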